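-- pv_equiv track=rewrite | github.com/greatcrock/First | ex24.py | isometric_strings
-- ===== SOURCE A (Python) =====
-- def isometric_strings(a, b):
--     a1, b1 = "", ""
--     for i in range(len(a)):
--         if a[i] not in a1:
--             a1 += a[i]
--         if b[i] not in b1:
--             b1 += b[i]
--     worder = {a1[i] : b1[i] for i in range(len(a1))}
--     for i in a:
--         a = a.replace(i, worder[i])
--     return a == b
-- ===== SOURCE B (Python) =====
-- def isometric_strings(a, b):
--     if len(a) != len(b):
--         return False
--     return all(a.index(x) == b.index(y) for x, y in zip(a, b))
-- ===== Notes on version B (the rewrite author's own statement) =====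
-- stated objective: simpler
-- what changed: B is the standard isomorphic-strings check (two characters correspond iff their first occurrences line up), replacing A's loop of whole-string str.replace calls whose sequential substitutions cascade into each other; Pre_ excludes only the inputs where A raises (b shorter than a, or b's prefix having fewer distinct characters than a).
-- intended difference: On equal-length pairs that ARE isomorphic but where some character's image under the position-wise first-occurrence pairing is another character of a occurring after that character's first occurrence, A's sequential replace cascades (e.g. A('ab','ba'): 'ab'->'bb'->'aa') and A wrongly returns False, while B returns True, the intended answer for an isometric/isomorphic-strings check. — e.g. on isometric_strings("ab", "ba"): A returns false, B returns true
import Mathlib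
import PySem

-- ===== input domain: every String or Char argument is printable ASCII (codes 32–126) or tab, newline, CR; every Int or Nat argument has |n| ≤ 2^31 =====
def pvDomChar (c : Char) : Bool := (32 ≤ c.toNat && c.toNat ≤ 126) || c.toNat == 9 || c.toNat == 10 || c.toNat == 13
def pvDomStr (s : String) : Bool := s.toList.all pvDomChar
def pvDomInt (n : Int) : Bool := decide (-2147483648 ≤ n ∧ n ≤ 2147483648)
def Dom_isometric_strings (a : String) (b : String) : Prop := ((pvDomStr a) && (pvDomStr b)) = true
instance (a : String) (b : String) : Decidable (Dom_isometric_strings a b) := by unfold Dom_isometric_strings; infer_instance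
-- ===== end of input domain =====

-- B is the standard first-occurrence isomorphism check (simpler); A's sequential
-- str.replace cascade returns the wrong value on the inputs described at D_ below.

-- ===== PORT A =====
-- literal transliteration of A: build a1/b1 (first-occurrence distinct chars), the
-- worder dict, then repeatedly a = a.replace(i, worder[i]) over the ORIGINAL a's chars.
def isometric_strings (a : String) (b : String) : Bool :=
  let al := a.toList
  let bl := b.toList
  -- a1, b1 = "", ""; for i in range(len(a)): if a[i] not in a1 … ; if b[i] not in b1 …
  let p := (PySem.List.pyRange 0 (al.length : Int)).foldl
    (fun (st : List Char × List Char) i =>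
      let ai := PySem.List.pyGetD al i ' '   -- a[i]; i is always in range for a here
      let bi := PySem.List.pyGetD bl i ' '   -- b[i]; IndexError when len(b) < len(a) — excluded by Pre_
      (if PySem.Chars.isIn [ai] st.1 then st.1 else st.1 ++ [ai],
       if PySem.Chars.isIn [bi] st.2 then st.2 else st.2 ++ [bi])) ([], [])
  let a1 := p.1
  let b1 := p.2
  -- worder = {a1[i]: b1[i] for i in range(len(a1))}; b1[i] IndexError when b has fewer
  -- distinct chars than a — excluded by Pre_
  let worder := (PySem.List.pyRange 0 (a1.length : Int)).foldl
    (fun (d : PySem.Dict Char Char) i =>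
      d.insert (PySem.List.pyGetD a1 i ' ') (PySem.List.pyGetD b1 i ' '))
    PySem.Dict.empty
  -- for i in a: a = a.replace(i, worder[i])   — iterates the snapshot of the original a;
  -- worder[i] never raises KeyError (every char of a is a key of worder)
  let s := al.foldl (fun s c => PySem.Chars.replace s [c] [worder.getD c ' ']) al
  decide (s = bl)

-- ===== PORT B =====
-- transliteration of Source B: length guard, then all(a.index(x) == b.index(y) for x, y in zip(a, b));
-- a.index(x) on a 1-char x is the index of x's first occurrence, i.e. PySem.List.index?.
def isometric_strings_alt (a : String) (b : String) : Bool :=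
  let al := a.toList
  let bl := b.toList
  if al.length ≠ bl.length then false
  else (al.zip bl).all (fun p => PySem.List.index? al p.1 == PySem.List.index? bl p.2)

-- ===== PRECONDITION & SPEC =====
-- Pre_ excludes exactly the inputs where A raises: b shorter than a (IndexError on b[i])
-- or b[:len(a)] having fewer distinct characters than a (IndexError on b1[i]).
def Pre_isometric_strings (a : String) (b : String) : Prop :=
  a.toList.length ≤ b.toList.length ∧
  (PySem.List.dedup a.toList).length ≤ (PySem.List.dedup (b.toList.take a.toList.length)).length
instance (a : String) (b : String) : Decidable (Pre_isometric_strings a b) := by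
  unfold Pre_isometric_strings; infer_instance

def pvWitness_isometric_strings : String × String := ("paper", "title")

-- On equal-length pairs that are genuinely isomorphic but where the image of some character
-- is another character of a occurring after the first one's first occurrence, A's sequential
-- replaces cascade (e.g. 'ab'->'bb'->'aa' for ('ab','ba')) and A wrongly returns False,
-- while B returns True, the intended answer for an isomorphic-strings check.
def D_isometric_strings (a : String) (b : String) : Prop :=
  a.toList.length = b.toList.length ∧
  (∀ p ∈ a.toList.zip b.toList,
     PySem.List.index? a.toList p.1 = PySem.List.index? b.toList p.2) ∧
  (∃ p ∈ a.toList.zip b.toList,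
     p.2 ≠ p.1 ∧ p.2 ∈ a.toList.drop (a.toList.idxOf p.1 + 1))
instance (a : String) (b : String) : Decidable (D_isometric_strings a b) := by
  unfold D_isometric_strings; infer_instance

def Spec_isometric_strings (a : String) (b : String) (out : Bool) : Prop :=
  ¬ D_isometric_strings a b → out = isometric_strings_alt a b
instance (a : String) (b : String) (out : Bool) : Decidable (Spec_isometric_strings a b out) := by
  unfold Spec_isometric_strings; infer_instance

def pvDiffWitness_isometric_strings : String × String := ("ab", "ba")
def pvDiffWitnessOut_isometric_strings : Bool × Bool := (false, true)

-- ===== CLAIM (what is proved, stated in full; the proofs are below) =====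
def Claim_unchanged_isometric_strings : Prop := ∀ (a : String) (b : String), Dom_isometric_strings a b → Pre_isometric_strings a b → Spec_isometric_strings a b (isometric_strings a b)
def Claim_changed_isometric_strings : Prop := Dom_isometric_strings (pvDiffWitness_isometric_strings.1) (pvDiffWitness_isometric_strings.2) ∧ Pre_isometric_strings (pvDiffWitness_isometric_strings.1) (pvDiffWitness_isometric_strings.2) ∧ D_isometric_strings (pvDiffWitness_isometric_strings.1) (pvDiffWitness_isometric_strings.2) ∧ isometric_strings (pvDiffWitness_isometric_strings.1) (pvDiffWitness_isometric_strings.2) = pvDiffWitnessOut_isometric_strings.1 ∧ isometric_strings_alt (pvDiffWitness_isometric_strings.1) (pvDiffWitness_isometric_strings.2) = pvDiffWitnessOut_isometric_strings.2 ∧ pvDiffWitnessOut_isometric_strings.1 ≠ pvDiffWitnessOut_isometric_strings.2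
def Claim_exact_isometric_strings : Prop := ∀ (a : String) (b : String), Dom_isometric_strings a b → Pre_isometric_strings a b → D_isometric_strings a b → isometric_strings a b ≠ isometric_strings_alt a b

-- ===== LEMMAS AND PROOFS =====

-- single-char membership: 'c in s' on strings is list membership
lemma isIn_singleton (c : Char) (s : List Char) : PySem.Chars.isIn [c] s = s.contains c := by
  have h2 : [c] <:+: s ↔ c ∈ s := by
    constructor
    · intro h; exact h.mem (List.mem_singleton_self c)
    · intro h
      obtain ⟨p, q, rfl⟩ := List.append_of_mem h
      exact ⟨p, q, by simp⟩
  rw [Bool.eq_iff_iff, PySem.Chars.isIn_iff_infix, h2, List.contains_iff_mem]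

lemma go_singleton (c t : Char) : ∀ (fuel : Nat) (l acc : List Char), l.length ≤ fuel →
    PySem.Chars.replace.go [c] [t] fuel l acc
      = acc.reverse ++ l.map (fun y => if y = c then t else y) := by
  intro fuel
  induction fuel with
  | zero => intro l acc h; rw [List.length_eq_zero_iff.mp (Nat.le_zero.mp h)]; simp [PySem.Chars.replace.go]
  | succ n ih =>
    intro l acc h
    match l with
    | [] => simp [PySem.Chars.replace.go]
    | x :: xs =>
      rw [PySem.Chars.replace.go]
      by_cases hx : x = c
      · subst hx
        simp only [List.isPrefixOf, BEq.rfl, Bool.true_and, if_true]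
        rw [ih _ _ (by simpa using Nat.le_of_succ_le_succ h)]
        simp
      · have hp : List.isPrefixOf [c] (x :: xs) = false := by
          simp [List.isPrefixOf]
          exact fun hh => absurd hh.symm hx
        rw [if_neg (by simp [hp])]
        rw [ih _ _ (by simpa using Nat.le_of_succ_le_succ h)]
        simp [hx]

-- substituting one char for another: str.replace with 1-char pattern and replacement is a map
lemma replace_singleton (c t : Char) (s : List Char) :
    PySem.Chars.replace s [c] [t] = s.map (fun y => if y = c then t else y) := by
  rw [PySem.Chars.replace]
  simp [go_singleton c t s.length s [] (le_refl _)]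

-- a foldl over range(n) reading xs[i] and ys[i] is a foldl over the zipped prefixes
lemma foldl_pyRange_zip {α β γ : Type} (xs : List α) (ys : List β) (n : Nat)
    (hx : n ≤ xs.length) (hy : n ≤ ys.length) (f : γ → α → β → γ) (dx : α) (dy : β) (init : γ) :
    (PySem.List.pyRange 0 (n : Int)).foldl
      (fun acc i => f acc (PySem.List.pyGetD xs i dx) (PySem.List.pyGetD ys i dy)) init
    = ((xs.take n).zip (ys.take n)).foldl (fun acc p => f acc p.1 p.2) init := by
  induction n with
  | zero => simp
  | succ k ih =>
    have hk : (((k : Nat) + 1 : Nat) : Int) = (k : Int) + 1 := by push_cast; ring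
    rw [hk, PySem.List.pyRange_one_succ_right (by positivity), List.foldl_append]
    rw [ih (by omega) (by omega)]
    have hxk : k < xs.length := by omega
    have hyk : k < ys.length := by omega
    rw [List.take_add_one, List.take_add_one]
    rw [List.getElem?_eq_getElem hxk, List.getElem?_eq_getElem hyk]
    have hzip : (xs.take k ++ [xs[k]]).zip (ys.take k ++ [ys[k]])
        = (xs.take k).zip (ys.take k) ++ [(xs[k], ys[k])] := by
      rw [List.zip_append (by simp [hxk.le, hyk.le])]
      rfl
    simp only [Option.toList_some, hzip, List.foldl_append, List.foldl_cons, List.foldl_nil]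
    rw [PySem.List.pyGetD_natCast, PySem.List.pyGetD_natCast]
    simp [List.getD, hxk, hyk]

lemma foldl_pair {α β γ : Type} (f : α → γ → α) (g : β → γ → β) (l : List γ) : ∀ (x : α) (y : β),
    l.foldl (fun st c => (f st.1 c, g st.2 c)) (x, y) = (l.foldl f x, l.foldl g y) := by
  induction l with
  | nil => intro x y; rfl
  | cons c cs ih => intro x y; simpa using ih (f x c) (g y c)

lemma zip_take_right {α β : Type} (l1 : List α) : ∀ (l2 : List β) (n : Nat), l1.length ≤ n →
    l1.zip (l2.take n) = l1.zip l2 := by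
  induction l1 with
  | nil => intro l2 n h; simp
  | cons x xs ih =>
    intro l2 n h
    match l2, n with
    | [], _ => simp
    | y :: ys, n + 1 => simpa using ih ys n (by simpa using h)

lemma foldl_zip_fst {α β γ : Type} (l1 : List α) (l2 : List β) (h : l1.length ≤ l2.length)
    (f : γ → α → γ) (init : γ) :
    (l1.zip l2).foldl (fun acc p => f acc p.1) init = l1.foldl f init := by
  conv_rhs => rw [← List.map_fst_zip h]
  rw [List.foldl_map]

lemma foldl_zip_snd {α β γ : Type} (l1 : List α) (l2 : List β) (h : l2.length ≤ l1.length)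
    (f : γ → β → γ) (init : γ) :
    (l1.zip l2).foldl (fun acc p => f acc p.2) init = l2.foldl f init := by
  conv_rhs => rw [← List.map_snd_zip h]
  rw [List.foldl_map]

-- the one-step substitution A's replace loop applies, as a function update
def pvSubst (g : Char → Char) (f : Char → Char) (c : Char) : Char → Char :=
  fun y => if f y = c then g c else f y

lemma A_replace_fold (g : Char → Char) (al : List Char) (cs : List Char) : ∀ f : Char → Char,
    cs.foldl (fun s c => s.map (fun y => if y = c then g c else y)) (al.map f)
    = al.map (cs.foldl (pvSubst g) f) := by
  induction cs with
  | nil => intro f; rfl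
  | cons c cs ih =>
    intro f
    have h : (al.map f).map (fun y => if y = c then g c else y) = al.map (pvSubst g f c) := by
      rw [List.map_map]; rfl
    simpa [h] using ih (pvSubst g f c)

-- A's worder lookup, as a function
def pvG (al bl : List Char) : Char → Char :=
  fun c => (PySem.Dict.ofList ((PySem.List.dedup al).zip (PySem.List.dedup (bl.take al.length)))).getD c ' '

-- evaluation of port A down to the composed substitution (under Pre_)
lemma A_eval (a b : String) (h1 : a.toList.length ≤ b.toList.length)
    (h2 : (PySem.List.dedup a.toList).length ≤ (PySem.List.dedup (b.toList.take a.toList.length)).length) :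
    isometric_strings a b
      = decide (a.toList.map (a.toList.foldl (pvSubst (pvG a.toList b.toList)) id) = b.toList) := by
  unfold isometric_strings pvG
  simp only []
  -- A's first loop: a foldl over range(len(a)) reading a[i] and b[i]
  rw [foldl_pyRange_zip a.toList b.toList a.toList.length le_rfl h1
      (fun st ai bi => (if PySem.Chars.isIn [ai] st.1 then st.1 else st.1 ++ [ai],
                        if PySem.Chars.isIn [bi] st.2 then st.2 else st.2 ++ [bi])) ' ' ' ' ([], [])]
  rw [List.take_length]
  rw [foldl_pair (fun (x : List Char) (p : Char × Char) => if PySem.Chars.isIn [p.1] x then x else x ++ [p.1])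
                 (fun (y : List Char) (p : Char × Char) => if PySem.Chars.isIn [p.2] y then y else y ++ [p.2])
                 (a.toList.zip (b.toList.take a.toList.length)) [] []]
  rw [foldl_zip_fst a.toList (b.toList.take a.toList.length) (by simpa using h1)
        (fun x c => if PySem.Chars.isIn [c] x then x else x ++ [c]) []]
  rw [foldl_zip_snd a.toList (b.toList.take a.toList.length) (by simp)
        (fun y c => if PySem.Chars.isIn [c] y then y else y ++ [c]) []]
  simp only [isIn_singleton]
  -- the two dedup folds ARE PySem.List.dedup (definitional)
  rw [show a.toList.foldl (fun (s : List Char) (c : Char) => if s.contains c then s else s ++ [c]) []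
        = PySem.List.dedup a.toList from rfl]
  rw [show (b.toList.take a.toList.length).foldl
        (fun (s : List Char) (c : Char) => if s.contains c then s else s ++ [c]) []
        = PySem.List.dedup (b.toList.take a.toList.length) from rfl]
  -- the worder comprehension: a foldl over range(len(a1)) reading a1[i] and b1[i]
  rw [foldl_pyRange_zip (PySem.List.dedup a.toList) (PySem.List.dedup (b.toList.take a.toList.length))
      (PySem.List.dedup a.toList).length le_rfl h2
      (fun (d : PySem.Dict Char Char) ai bi => d.insert ai bi) ' ' ' ' PySem.Dict.empty]
  rw [List.take_length]
  rw [zip_take_right (PySem.List.dedup a.toList) (PySem.List.dedup (b.toList.take a.toList.length))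
      (PySem.List.dedup a.toList).length le_rfl]
  rw [show ((PySem.List.dedup a.toList).zip (PySem.List.dedup (b.toList.take a.toList.length))).foldl
        (fun (acc : PySem.Dict Char Char) p => acc.insert p.1 p.2) PySem.Dict.empty
        = PySem.Dict.ofList ((PySem.List.dedup a.toList).zip (PySem.List.dedup (b.toList.take a.toList.length)))
        from rfl]
  -- the replace loop composes single-char substitutions
  simp only [replace_singleton]
  have hA := A_replace_fold
      (fun c => (PySem.Dict.ofList ((PySem.List.dedup a.toList).zip
        (PySem.List.dedup (b.toList.take a.toList.length)))).getD c ' ') a.toList a.toList id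
  rw [List.map_id] at hA
  rw [hA]

-- named forms of the conditions D_ is made of (same formulas)
def PvIdxIso (al bl : List Char) : Prop :=
  ∀ i < al.length, PySem.List.index? al (al.getD i ' ') = PySem.List.index? bl (bl.getD i ' ')
def PvBadPos (al bl : List Char) : Prop :=
  ∃ p < al.length, ∃ q < al.length,
    bl.getD p ' ' = al.getD q ' ' ∧ al.getD q ' ' ≠ al.getD p ' ' ∧ al.idxOf (al.getD p ' ') < q
-- the symmetric, relational form of being isomorphic
def PvRelIso (al bl : List Char) : Prop :=
  ∀ i j, i < al.length → j < al.length → (al.getD i ' ' = al.getD j ' ' ↔ bl.getD i ' ' = bl.getD j ' ')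

lemma index?_some (xs : List Char) (v : Char) (k : Nat) :
    PySem.List.index? xs v = some k ↔ ∃ h : k < xs.length, xs[k] = v ∧ ∀ j (_ : j < k), ¬ xs[j] = v := by
  rw [PySem.List.index?_eq_idxOf?]
  exact List.idxOf?_eq_some_iff

lemma getD_eq {l : List Char} {i : Nat} (h : i < l.length) : l.getD i ' ' = l[i] :=
  List.getD_eq_getElem l ' ' h

lemma index?_mem_some (xs : List Char) (v : Char) (h : v ∈ xs) :
    ∃ k, PySem.List.index? xs v = some k := by
  have := (PySem.List.index?_isSome_iff (xs := xs) (v := v)).mpr h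
  exact Option.isSome_iff_exists.mp this

-- PvIdxIso implies the symmetric relational form (lengths equal)
lemma idx_to_rel {al bl : List Char} (hlen : al.length = bl.length) (h : PvIdxIso al bl) :
    PvRelIso al bl := by
  intro i j hi hj
  have hib : i < bl.length := hlen ▸ hi
  have hjb : j < bl.length := hlen ▸ hj
  constructor
  · intro hij
    have he : PySem.List.index? bl (bl.getD i ' ') = PySem.List.index? bl (bl.getD j ' ') := by
      rw [← h i hi, ← h j hj, hij]
    obtain ⟨k, hk⟩ := index?_mem_some bl (bl.getD i ' ') (by rw [getD_eq hib]; exact bl.getElem_mem hib)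
    obtain ⟨hk1, hk2, -⟩ := (index?_some _ _ _).mp hk
    obtain ⟨hk1', hk2', -⟩ := (index?_some _ _ _).mp (he ▸ hk)
    rw [← hk2, hk2']
  · intro hij
    have he : PySem.List.index? al (al.getD i ' ') = PySem.List.index? al (al.getD j ' ') := by
      rw [h i hi, h j hj, hij]
    obtain ⟨k, hk⟩ := index?_mem_some al (al.getD i ' ') (by rw [getD_eq hi]; exact al.getElem_mem hi)
    obtain ⟨hk1, hk2, -⟩ := (index?_some _ _ _).mp hk
    obtain ⟨hk1', hk2', -⟩ := (index?_some _ _ _).mp (he ▸ hk)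
    rw [← hk2, hk2']

lemma pv_mem_drop (l : List Char) (k : Nat) (y : Char) :
    y ∈ l.drop k ↔ ∃ q, ∃ _ : q < l.length, k ≤ q ∧ l[q] = y := by
  rw [List.mem_iff_getElem]
  constructor
  · rintro ⟨i, hi, he⟩
    rw [List.getElem_drop] at he
    rw [List.length_drop] at hi
    exact ⟨k + i, by omega, by omega, he⟩
  · rintro ⟨q, hq, hkq, he⟩
    refine ⟨q - k, by rw [List.length_drop]; omega, ?_⟩
    rw [List.getElem_drop, ← he]
    congr 1
    omega

-- the pair-wise form of the first-occurrence condition is the indexed one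
lemma zip_forall_iff {al bl : List Char} (hlen : al.length = bl.length) :
    (∀ p ∈ al.zip bl, PySem.List.index? al p.1 = PySem.List.index? bl p.2) ↔ PvIdxIso al bl := by
  constructor
  · intro hall i hi
    have hib : i < bl.length := hlen ▸ hi
    have hiz : i < (al.zip bl).length := by rw [List.length_zip]; omega
    have hmem : (al[i], bl[i]) ∈ al.zip bl := by
      have := List.getElem_mem hiz
      rwa [List.getElem_zip] at this
    have := hall _ hmem
    rwa [getD_eq hi, getD_eq hib]
  · intro hiso p hp
    obtain ⟨i, hiz, hpe⟩ := List.mem_iff_getElem.mp hp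
    rw [List.length_zip] at hiz
    have hi : i < al.length := by omega
    have hib : i < bl.length := by omega
    rw [List.getElem_zip] at hpe
    have := hiso i hi
    rw [getD_eq hi, getD_eq hib] at this
    rw [← hpe]
    exact this

-- the pair-wise form of the collision condition is the positional one
lemma zip_exists_iff {al bl : List Char} (hlen : al.length = bl.length) :
    (∃ p ∈ al.zip bl, p.2 ≠ p.1 ∧ p.2 ∈ al.drop (al.idxOf p.1 + 1)) ↔ PvBadPos al bl := by
  constructor
  · rintro ⟨p, hp, hne, hdrop⟩
    obtain ⟨i, hiz, hpe⟩ := List.mem_iff_getElem.mp hp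
    rw [List.length_zip] at hiz
    have hi : i < al.length := by omega
    have hib : i < bl.length := by omega
    rw [List.getElem_zip] at hpe
    subst hpe
    obtain ⟨q, hq, hkq, hqe⟩ := (pv_mem_drop _ _ _).mp hdrop
    refine ⟨i, hi, q, hq, ?_, ?_, ?_⟩
    · rw [getD_eq hib, getD_eq hq]
      exact hqe.symm
    · rw [getD_eq hq, getD_eq hi]
      rw [hqe]
      exact hne
    · rw [getD_eq hi]
      exact Nat.lt_of_succ_le hkq
  · rintro ⟨pp, hpp, q, hq, w1, w2, w3⟩
    have hppb : pp < bl.length := hlen ▸ hpp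
    rw [getD_eq hppb, getD_eq hq] at w1
    rw [getD_eq hq, getD_eq hpp] at w2
    rw [getD_eq hpp] at w3
    refine ⟨(al[pp], bl[pp]), ?_, ?_, ?_⟩
    · refine List.mem_iff_getElem.mpr ⟨pp, by rw [List.length_zip]; omega, ?_⟩
      rw [List.getElem_zip]
    · show bl[pp] ≠ al[pp]
      rw [w1]
      exact w2
    · show bl[pp] ∈ al.drop (al.idxOf al[pp] + 1)
      refine (pv_mem_drop _ _ _).mpr ⟨q, hq, by omega, w1.symm⟩

lemma D_iff (a b : String) :
    D_isometric_strings a b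
      ↔ a.toList.length = b.toList.length ∧ PvIdxIso a.toList b.toList ∧ PvBadPos a.toList b.toList := by
  unfold D_isometric_strings
  constructor
  · rintro ⟨hl, hf, he⟩
    exact ⟨hl, (zip_forall_iff hl).mp hf, (zip_exists_iff hl).mp he⟩
  · rintro ⟨hl, hf, he⟩
    exact ⟨hl, (zip_forall_iff hl).mpr hf, (zip_exists_iff hl).mpr he⟩

-- under the isomorphism relation, deduplication aligns position-wise:
-- the distinct pairs of zip(a,b) project to the distinct chars of a and of b
lemma dedup_zip {al bl : List Char} (hlen : al.length = bl.length) (hrel : PvRelIso al bl) :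
    ∀ k, k ≤ al.length →
      (PySem.List.dedup ((al.take k).zip (bl.take k))).map Prod.fst = PySem.List.dedup (al.take k) ∧
      (PySem.List.dedup ((al.take k).zip (bl.take k))).map Prod.snd = PySem.List.dedup (bl.take k) := by
  intro k
  induction k with
  | zero => simp
  | succ k ih =>
    intro hk1
    obtain ⟨ih1, ih2⟩ := ih (by omega)
    have hka : k < al.length := by omega
    have hkb : k < bl.length := by omega
    have hta : al.take (k+1) = al.take k ++ [al[k]] := by
      rw [List.take_add_one, List.getElem?_eq_getElem hka, Option.toList_some]
    have htb : bl.take (k+1) = bl.take k ++ [bl[k]] := by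
      rw [List.take_add_one, List.getElem?_eq_getElem hkb, Option.toList_some]
    have hlta : (al.take k).length = k := by rw [List.length_take]; omega
    have hltb : (bl.take k).length = k := by rw [List.length_take]; omega
    have hzip : (al.take (k+1)).zip (bl.take (k+1))
        = (al.take k).zip (bl.take k) ++ [(al[k], bl[k])] := by
      rw [hta, htb, List.zip_append (by rw [hlta, hltb])]; rfl
    have hmja : ∀ j, (hj : j < k) → ((al[j]'(by omega) = al[k]) ↔ (bl[j]'(by omega) = bl[k])) := by
      intro j hj
      have h := hrel j k (by omega) hka
      rw [getD_eq (show j < al.length by omega), getD_eq hka,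
          getD_eq (show j < bl.length by omega), getD_eq hkb] at h
      exact h
    have hmem1 : (al[k] ∈ al.take k) ↔ (bl[k] ∈ bl.take k) := by
      rw [List.mem_take_iff_getElem, List.mem_take_iff_getElem]
      constructor
      · rintro ⟨j, hj, he⟩
        have hjk : j < k := by omega
        refine ⟨j, by omega, ?_⟩
        exact (hmja j hjk).mp (by simpa using he)
      · rintro ⟨j, hj, he⟩
        have hjk : j < k := by omega
        refine ⟨j, by omega, ?_⟩
        exact (hmja j hjk).mpr (by simpa using he)
    have hmemp : ((al[k], bl[k]) ∈ (al.take k).zip (bl.take k)) ↔ (al[k] ∈ al.take k) := by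
      constructor
      · intro h
        exact (List.of_mem_zip h).1
      · rw [List.mem_take_iff_getElem]
        rintro ⟨j, hj, he⟩
        have hjk : j < k := by omega
        have hb : bl[j]'(by omega) = bl[k] := (hmja j hjk).mp (by simpa using he)
        refine List.mem_iff_getElem.mpr ⟨j, ?_, ?_⟩
        · rw [List.length_zip, hlta, hltb]; omega
        · rw [List.getElem_zip, List.getElem_take, List.getElem_take]
          rw [Prod.mk.injEq]
          exact ⟨by simpa using he, hb⟩
    rw [hzip, hta, htb]
    simp only [PySem.List.dedup_eq_ofList] at ih1 ih2 ⊢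
    rw [PySem.Set.ofList_append_singleton, PySem.Set.ofList_append_singleton,
        PySem.Set.ofList_append_singleton]
    by_cases h : al[k] ∈ List.take k al
    · have h2 := hmem1.mp h
      simp [PySem.Set.add, hmemp, h, h2, ih1, ih2]
    · have h2 : ¬ bl[k] ∈ List.take k bl := fun hb => h (hmem1.mpr hb)
      simp [PySem.Set.add, hmemp, h, h2, ih1, ih2]

lemma index?_idxOf {al : List Char} {c : Char} (hc : c ∈ al) :
    PySem.List.index? al c = some (al.idxOf c) := by
  obtain ⟨m, hm⟩ := index?_mem_some al c hc
  have hmeq : al.idxOf c = m := by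
    rw [List.idxOf_eq_getD_idxOf?, ← PySem.List.index?_eq_idxOf?, hm]; rfl
  rw [hm, hmeq]

-- A's worder lookup sends each character of a to b's character at its first occurrence
lemma pvG_eq {al bl : List Char} (hlen : al.length = bl.length) (hrel : PvRelIso al bl)
    {c : Char} (hc : c ∈ al) :
    pvG al bl c = bl.getD (al.idxOf c) ' ' := by
  obtain ⟨hd1, hd2⟩ := dedup_zip hlen hrel al.length le_rfl
  have hta : al.take al.length = al := List.take_length
  have htb : bl.take al.length = bl := by rw [hlen]; exact List.take_length
  rw [hta, htb] at hd1 hd2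
  unfold pvG
  rw [htb]
  have hzipL : (PySem.List.dedup al).zip (PySem.List.dedup bl) = PySem.List.dedup (al.zip bl) := by
    rw [← hd1, ← hd2]
    exact Eq.symm (List.zip_of_prod rfl rfl)
  rw [hzipL]
  have hkeysnd : ((PySem.List.dedup (al.zip bl)).map Prod.fst).Nodup := by
    rw [hd1]; exact PySem.List.nodup_dedup al
  have hitems : (PySem.Dict.ofList (PySem.List.dedup (al.zip bl))).items
      = PySem.List.dedup (al.zip bl) := by
    have := PySem.Dict.items_foldl_insert_fresh (PySem.List.dedup (al.zip bl)) Prod.fst Prod.snd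
      PySem.Dict.empty (fun a _ => PySem.Dict.contains_empty _) hkeysnd
    simpa using this
  have hkeys : (PySem.Dict.ofList (PySem.List.dedup (al.zip bl))).keys.Nodup := by
    rw [show (PySem.Dict.ofList (PySem.List.dedup (al.zip bl))).keys
          = (PySem.Dict.ofList (PySem.List.dedup (al.zip bl))).items.map Prod.fst from rfl, hitems]
    exact hkeysnd
  have hk0 : al.idxOf c < al.length := List.idxOf_lt_length_of_mem hc
  have hk0b : al.idxOf c < bl.length := hlen ▸ hk0
  have hpair : (c, bl.getD (al.idxOf c) ' ')
      ∈ (PySem.Dict.ofList (PySem.List.dedup (al.zip bl))).items := by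
    rw [hitems, PySem.List.mem_dedup]
    refine List.mem_iff_getElem.mpr ⟨al.idxOf c, ?_, ?_⟩
    · rw [List.length_zip]; omega
    · rw [List.getElem_zip, getD_eq hk0b, List.getElem_idxOf hk0]
  exact PySem.Dict.getD_of_mem_items _ hpair hkeys ' '

-- the invariant of A's replace loop when no substitution collides with a later character:
-- after processing the first k characters of a, each distinct character already seen maps to
-- b's character at its first occurrence, every other one is still fixed
lemma cascade {al bl : List Char} (hlen : al.length = bl.length) (hrel : PvRelIso al bl)
    (K : Nat)
    (hnb : ∀ p, p < al.length → ∀ q, q < al.length →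
      bl.getD p ' ' = al.getD q ' ' → al.getD q ' ' ≠ al.getD p ' ' →
      al.idxOf (al.getD p ' ') < q → K ≤ q) :
    ∀ k, k ≤ al.length → k ≤ K → ∀ c, c ∈ al →
      ((al.take k).foldl (pvSubst (pvG al bl)) id) c
        = if al.idxOf c < k then bl.getD (al.idxOf c) ' ' else c := by
  intro k
  induction k with
  | zero => intro _ _ c _; simp
  | succ k ih =>
    intro hk1 hkK c hc
    have hka : k < al.length := by omega
    have hta : al.take (k+1) = al.take k ++ [al[k]] := by
      rw [List.take_add_one, List.getElem?_eq_getElem hka, Option.toList_some]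
    rw [hta, List.foldl_append, List.foldl_cons, List.foldl_nil]
    have hd : al[k] ∈ al := al.getElem_mem hka
    have hidxd : al.idxOf al[k] ≤ k := by
      by_contra hgt
      obtain ⟨_h1, _h2, hmin⟩ := (index?_some _ _ _).mp (index?_idxOf hd)
      exact hmin k (by omega) rfl
    have hfc := ih (by omega) (by omega) c hc
    have hlc : al.idxOf c < al.length := List.idxOf_lt_length_of_mem hc
    simp only [pvSubst]
    rw [hfc]
    by_cases hck : al.idxOf c < k
    · rw [if_pos hck]
      by_cases heq : bl.getD (al.idxOf c) ' ' = al[k]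
      · by_cases hcd : c = al[k]
        · rw [if_pos heq, if_pos (by omega : al.idxOf c < k + 1)]
          rw [pvG_eq hlen hrel hd, ← hcd]
        · exfalso
          have hKk := hnb (al.idxOf c) (by omega) k hka
            (by rw [getD_eq hka]; exact heq)
            (by rw [getD_eq hka, getD_eq hlc, List.getElem_idxOf]; exact fun hh => hcd hh.symm)
            (by rw [getD_eq hlc, List.getElem_idxOf]; exact hck)
          omega
      · rw [if_neg heq, if_pos (by omega : al.idxOf c < k + 1)]
    · rw [if_neg hck]
      by_cases hcd : c = al[k]
      · have hik : al.idxOf c = k := by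
          rw [hcd] at hck ⊢
          omega
        rw [if_pos hcd, if_pos (by omega : al.idxOf c < k + 1)]
        rw [pvG_eq hlen hrel hd, ← hcd]
      · have hne : al.idxOf c ≠ k := by
          intro hk0
          apply hcd
          have hg : al[k]? = some c := by
            rw [← hk0, List.getElem?_eq_getElem hlc, List.getElem_idxOf hlc]
          rw [List.getElem?_eq_getElem hka] at hg
          exact (Option.some_injective _ hg).symm
        rw [if_neg hcd, if_neg (by omega : ¬ al.idxOf c < k + 1)]

-- under the first-occurrence condition, b's character at the first occurrence of a[i] is b[i]
lemma phi_get {al bl : List Char} (hlen : al.length = bl.length) (hidx : PvIdxIso al bl)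
    {i : Nat} (hi : i < al.length) :
    bl.getD (al.idxOf al[i]) ' ' = bl[i]'(hlen ▸ hi) := by
  have hib : i < bl.length := hlen ▸ hi
  have hc : al[i] ∈ al := al.getElem_mem hi
  have hbmem : bl[i] ∈ bl := bl.getElem_mem hib
  have hidxeq : al.idxOf al[i] = bl.idxOf bl[i] := by
    have h := hidx i hi
    rw [getD_eq hi, getD_eq hib, index?_idxOf hc, index?_idxOf hbmem] at h
    exact Option.some_injective _ h
  have hlcb : bl.idxOf bl[i] < bl.length := List.idxOf_lt_length_of_mem hbmem
  rw [hidxeq, getD_eq hlcb, List.getElem_idxOf]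

-- positive case: on an isomorphic pair with no collision the composed substitution sends a to b
lemma pos_case {al bl : List Char} (hlen : al.length = bl.length) (hidx : PvIdxIso al bl)
    (hnb : ¬ PvBadPos al bl) :
    al.map (al.foldl (pvSubst (pvG al bl)) id) = bl := by
  have hrel := idx_to_rel hlen hidx
  apply List.ext_getElem (by rw [List.length_map]; exact hlen)
  intro i h1 h2
  rw [List.length_map] at h1
  rw [List.getElem_map]
  have hc : al[i] ∈ al := al.getElem_mem h1
  have hnb' : ∀ p, p < al.length → ∀ q, q < al.length →
      bl.getD p ' ' = al.getD q ' ' → al.getD q ' ' ≠ al.getD p ' ' →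
      al.idxOf (al.getD p ' ') < q → al.length ≤ q :=
    fun p hp q hq w1 w2 w3 => absurd ⟨p, hp, q, hq, w1, w2, w3⟩ hnb
  have hF := cascade hlen hrel al.length hnb' al.length le_rfl le_rfl al[i] hc
  rw [List.take_length] at hF
  have hlc : al.idxOf al[i] < al.length := List.idxOf_lt_length_of_mem hc
  rw [hF, if_pos hlc]
  exact phi_get hlen hidx h1

-- a distinct-count, not order, fact: length of the orderless dedup is the card of the finset
lemma dedup_length_card (l : List Char) : (PySem.List.dedup l).length = l.toFinset.card := by
  rw [← List.toFinset_card_of_nodup (PySem.List.nodup_dedup l)]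
  congr 1
  ext x
  simp

-- negative case: if the composed substitution DOES send a to b then (under Pre_'s distinct-count
-- inequality) it is injective on a's characters, so the pair was isomorphic after all
lemma F_injOn {al bl : List Char} (hlen : al.length = bl.length)
    (h2 : (PySem.List.dedup al).length ≤ (PySem.List.dedup (bl.take al.length)).length)
    (heq : al.map (al.foldl (pvSubst (pvG al bl)) id) = bl) :
    Set.InjOn (al.foldl (pvSubst (pvG al bl)) id) ↑al.toFinset := by
  have htb : bl.take al.length = bl := by rw [hlen]; exact List.take_length
  rw [htb] at h2
  rw [dedup_length_card, dedup_length_card] at h2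
  set F := al.foldl (pvSubst (pvG al bl)) id with hF
  have hbfin : bl.toFinset = al.toFinset.image F := by
    rw [← heq]
    ext x
    simp
  have hcard : (al.toFinset.image F).card = al.toFinset.card := by
    have hle := Finset.card_image_le (s := al.toFinset) (f := F)
    rw [hbfin] at h2
    omega
  exact Finset.injOn_of_card_image_eq hcard

lemma inj_case {al bl : List Char} (hlen : al.length = bl.length)
    (h2 : (PySem.List.dedup al).length ≤ (PySem.List.dedup (bl.take al.length)).length)
    (heq : al.map (al.foldl (pvSubst (pvG al bl)) id) = bl) :
    PvIdxIso al bl := by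
  set F := al.foldl (pvSubst (pvG al bl)) id with hF
  have hinj := F_injOn hlen h2 heq
  have hblget : ∀ j (hj : j < bl.length), bl[j] = F (al[j]'(by omega)) := by
    intro j hj
    have hja : j < al.length := by omega
    have h' : bl[j]? = some (F al[j]) := by
      rw [← heq, List.getElem?_map, List.getElem?_eq_getElem hja]
      rfl
    rw [List.getElem?_eq_getElem hj] at h'
    exact Option.some_injective _ h'
  intro i hi
  have hib : i < bl.length := hlen ▸ hi
  have hc : al[i] ∈ al := al.getElem_mem hi
  have hbmem : bl[i] ∈ bl := bl.getElem_mem hib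
  obtain ⟨hk1, hk2, hk3⟩ := (index?_some _ _ _).mp (index?_idxOf hc)
  rw [getD_eq hi, getD_eq hib, index?_idxOf hc]
  symm
  rw [index?_some]
  have hmem' : al.idxOf al[i] < bl.length := hlen ▸ hk1
  have hgoal1 : bl[al.idxOf al[i]]'hmem' = bl[i] := by
    rw [hblget _ hmem', hblget i hib]
    exact congrArg F hk2
  have hgoal2 : ∀ j, j < al.idxOf al[i] → ¬ bl[j]? = some bl[i] := by
    intro j hj hbad'
    have hja : j < al.length := by omega
    have hjb : j < bl.length := hlen ▸ hja
    rw [List.getElem?_eq_getElem hjb] at hbad'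
    have hbad : bl[j] = bl[i] := Option.some_injective _ hbad'
    rw [hblget _ hjb, hblget i hib] at hbad
    have hji : al[j] = al[i] := by
      have hm1 : al[j]'hja ∈ (al.toFinset : Set Char) := by simp
      have hm2 : al[i] ∈ (al.toFinset : Set Char) := by simp
      exact hinj hm1 hm2 (by simpa using hbad)
    exact hk3 j hj hji
  refine ⟨hmem', hgoal1, fun j hj hbad => hgoal2 j hj ?_⟩
  rw [List.getElem?_eq_getElem (show j < bl.length by omega), hbad]

-- once two characters share a value, every later substitution keeps them shared
lemma persist (g : Char → Char) (rest : List Char) :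
    ∀ (f : Char → Char) (c d : Char), f c = f d →
      (rest.foldl (pvSubst g) f) c = (rest.foldl (pvSubst g) f) d := by
  induction rest with
  | nil => intro f c d h; exact h
  | cons x xs ih =>
    intro f c d h
    rw [List.foldl_cons]
    apply ih
    simp only [pvSubst, h]

-- B's result, as the pointwise first-occurrence condition
lemma B_eval (a b : String) :
    isometric_strings_alt a b
      = decide (a.toList.length = b.toList.length ∧
          ∀ i < a.toList.length,
            PySem.List.index? a.toList (a.toList.getD i ' ')
              = PySem.List.index? b.toList (b.toList.getD i ' ')) := by
  unfold isometric_strings_alt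
  simp only []
  by_cases hlen : a.toList.length = b.toList.length
  · rw [if_neg (by simp [hlen])]
    rw [Bool.eq_iff_iff]
    simp only [List.all_eq_true, decide_eq_true_eq, beq_iff_eq]
    constructor
    · intro hall
      refine ⟨hlen, fun i hi => ?_⟩
      have hib : i < b.toList.length := hlen ▸ hi
      have hiz : i < (a.toList.zip b.toList).length := by rw [List.length_zip]; omega
      have hmem : (a.toList[i], b.toList[i]) ∈ a.toList.zip b.toList := by
        have := List.getElem_mem hiz
        rwa [List.getElem_zip] at this
      have := hall _ hmem
      rwa [getD_eq hi, getD_eq hib]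
    · rintro ⟨-, hiso⟩ p hp
      obtain ⟨i, hiz, hpe⟩ := List.mem_iff_getElem.mp hp
      rw [List.length_zip] at hiz
      have hi : i < a.toList.length := by omega
      have hib : i < b.toList.length := by omega
      rw [List.getElem_zip] at hpe
      have := hiso i hi
      rw [getD_eq hi, getD_eq hib] at this
      rw [← hpe]
      simpa using this
  · rw [if_pos hlen]
    symm
    exact decide_eq_false (fun h => hlen h.1)

-- ===== VERDICT (by name: the statements are the Claim_ definitions above) =====
theorem isometric_strings_spec : Claim_unchanged_isometric_strings := by
  intro a b _ hpre
  obtain ⟨h1, h2⟩ := hpre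
  unfold Spec_isometric_strings
  intro hnD
  rw [A_eval a b h1 h2, B_eval a b]
  by_cases hL : a.toList.length = b.toList.length
  · by_cases hI : PvIdxIso a.toList b.toList
    · have hnb : ¬ PvBadPos a.toList b.toList := fun hb => hnD ((D_iff a b).mpr ⟨hL, hI, hb⟩)
      rw [pos_case hL hI hnb]
      rw [decide_eq_true rfl, decide_eq_true ⟨hL, hI⟩]
    · have hne : ¬ (a.toList.map (a.toList.foldl (pvSubst (pvG a.toList b.toList)) id) = b.toList) :=
        fun he => hI (inj_case hL h2 he)
      rw [decide_eq_false hne, decide_eq_false (fun hcon => hI hcon.2)]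
  · have hne : ¬ (a.toList.map (a.toList.foldl (pvSubst (pvG a.toList b.toList)) id) = b.toList) :=
      fun he => hL (by rw [← he, List.length_map])
    rw [decide_eq_false hne, decide_eq_false (fun hcon => hL hcon.1)]

theorem isometric_strings_changed : Claim_changed_isometric_strings := by
  unfold Claim_changed_isometric_strings; decide

theorem isometric_strings_tight : Claim_exact_isometric_strings := by
  intro a b _ hpre hD
  obtain ⟨h1, h2⟩ := hpre
  obtain ⟨hL, hI, hbad⟩ := (D_iff a b).mp hD
  have hrel := idx_to_rel hL hI
  have hB : isometric_strings_alt a b = true := by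
    rw [B_eval a b]
    exact decide_eq_true ⟨hL, hI⟩
  rw [A_eval a b h1 h2, hB]
  intro hAB
  have heq := of_decide_eq_true hAB
  -- the earliest colliding occurrence
  have hex : ∃ q, q < a.toList.length ∧ ∃ p, p < a.toList.length ∧
      (b.toList.getD p ' ' = a.toList.getD q ' ' ∧ a.toList.getD q ' ' ≠ a.toList.getD p ' ' ∧
       a.toList.idxOf (a.toList.getD p ' ') < q) := by
    obtain ⟨p0, hp0, q0, hq0, w1, w2, w3⟩ := hbad
    exact ⟨q0, hq0, p0, hp0, w1, w2, w3⟩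
  obtain ⟨hQn, p, hp, v1, v2, v3⟩ := Nat.find_spec hex
  have hmin := fun m (hm : m < Nat.find hex) => Nat.find_min hex hm
  set Q := Nat.find hex with hQdef
  set g := pvG a.toList b.toList with hg
  have hpb : p < b.toList.length := hL ▸ hp
  have hQb : Q < b.toList.length := hL ▸ hQn
  have hccmem : a.toList.getD p ' ' ∈ a.toList := by
    rw [getD_eq hp]; exact a.toList.getElem_mem hp
  have hdmem : a.toList.getD Q ' ' ∈ a.toList := by
    rw [getD_eq hQn]; exact a.toList.getElem_mem hQn
  -- the image of the early character is exactly the character at position Q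
  have hphi : b.toList.getD (a.toList.idxOf (a.toList.getD p ' ')) ' ' = a.toList.getD Q ' ' := by
    rw [getD_eq hp, phi_get hL hI hp, ← getD_eq hpb]
    exact v1
  -- no collision occurs before Q
  have hnbQ : ∀ p', p' < a.toList.length → ∀ q', q' < a.toList.length →
      b.toList.getD p' ' ' = a.toList.getD q' ' ' → a.toList.getD q' ' ' ≠ a.toList.getD p' ' ' →
      a.toList.idxOf (a.toList.getD p' ' ') < q' → Q ≤ q' := by
    intro p' hp' q' hq' u1 u2 u3
    by_contra hlt
    exact hmin q' (by omega) ⟨hq', p', hp', u1, u2, u3⟩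
  have hinv := cascade hL hrel Q hnbQ Q (by omega) le_rfl
  -- after step Q the two characters carry the same value
  have htake1 : a.toList.take (Q+1) = a.toList.take Q ++ [a.toList[Q]] := by
    rw [List.take_add_one, List.getElem?_eq_getElem hQn, Option.toList_some]
  have hidxQ : a.toList.idxOf (a.toList.getD Q ' ') ≤ Q := by
    rw [getD_eq hQn]
    by_contra hgt
    obtain ⟨_h1, _h2, hmn⟩ := (index?_some _ _ _).mp
      (index?_idxOf (a.toList.getElem_mem hQn))
    exact hmn Q (by omega) rfl
  have hstep : ((a.toList.take (Q+1)).foldl (pvSubst g) id) (a.toList.getD p ' ')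
      = ((a.toList.take (Q+1)).foldl (pvSubst g) id) (a.toList.getD Q ' ') := by
    rw [htake1, List.foldl_append, List.foldl_cons, List.foldl_nil]
    have hfc := hinv (a.toList.getD p ' ') hccmem
    have hfd := hinv (a.toList.getD Q ' ') hdmem
    simp only [pvSubst]
    rw [hfc, hfd, if_pos v3]
    have hphiQ : b.toList.getD (a.toList.idxOf (a.toList.getD p ' ')) ' ' = a.toList[Q] := by
      rw [hphi, getD_eq hQn]
    rw [if_pos hphiQ]
    have hgQ : g (a.toList[Q]) = b.toList.getD (a.toList.idxOf (a.toList.getD Q ' ')) ' ' := by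
      rw [hg, pvG_eq hL hrel (a.toList.getElem_mem hQn)]
      rw [getD_eq hQn]
    by_cases hdQ : a.toList.idxOf (a.toList.getD Q ' ') < Q
    · rw [if_pos hdQ]
      by_cases hfix : b.toList.getD (a.toList.idxOf (a.toList.getD Q ' ')) ' ' = a.toList[Q]
      · rw [if_pos hfix, hgQ]
      · rw [if_neg hfix, hgQ]
    · rw [if_neg hdQ]
      rw [if_pos (getD_eq hQn)]
  -- the shared value persists to the end of the loop
  have hl0 : a.toList.foldl (pvSubst g) id
      = ((a.toList.take (Q+1)) ++ (a.toList.drop (Q+1))).foldl (pvSubst g) id := by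
    rw [List.take_append_drop]
  have hFeq : (a.toList.foldl (pvSubst g) id) (a.toList.getD p ' ')
      = (a.toList.foldl (pvSubst g) id) (a.toList.getD Q ' ') := by
    rw [hl0, List.foldl_append]
    exact persist g _ _ _ _ hstep
  -- but the final substitution is injective on a's characters, so the two characters coincide
  have hinj := F_injOn hL h2 heq
  have hccF : a.toList.getD p ' ' ∈ (a.toList.toFinset : Set Char) := by
    simpa using hccmem
  have hdF : a.toList.getD Q ' ' ∈ (a.toList.toFinset : Set Char) := by
    simpa using hdmem
  exact v2 (hinj hdF hccF hFeq.symm)
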